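-- pv_equiv track=rewrite | github.com/AlexandraElenaGeorgescu15/architect_ai | backend/services/model_service.py | normalize_model_id
-- ===== SOURCE A (Python) =====
-- def normalize_model_id(model_id: str, default_provider: str = "ollama") -> tuple[str, str]:
--     """
--     Normalize model ID to a consistent format.
--
--     Handles various formats:
--     - "llama3" -> ("ollama", "llama3")
--     - "ollama:llama3" -> ("ollama", "llama3")
--     - "ollama:llama3:latest" -> ("ollama", "llama3:latest")
--     - "gemini:gemini-2.5-flash" -> ("gemini", "gemini-2.5-flash")
--
--     Args:
--         model_id: Model identifier in any format
--         default_provider: Default provider if not specified (default: "ollama")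
--
--     Returns:
--         Tuple of (provider, model_name)
--     """
--     if not model_id:
--         return (default_provider, "llama3")
--
--     model_id = model_id.strip()
--
--     # Check for provider prefix
--     known_providers = ["ollama", "gemini", "openai", "anthropic", "groq", "huggingface"]
--
--     for provider in known_providers:
--         if model_id.startswith(f"{provider}:"):
--             # Extract model name after provider prefix
--             model_name = model_id[len(provider) + 1:]
--             return (provider, model_name)
--
--     # No provider prefix - check if it looks like a cloud model
--     cloud_model_patterns = {
--         "gemini": ["gemini-"],
--         "openai": ["gpt-", "davinci", "curie", "babbage", "ada"],
--         "anthropic": ["claude-"],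
--         "groq": ["llama-3.3", "llama-3.1", "mixtral"],
--     }
--
--     for provider, patterns in cloud_model_patterns.items():
--         for pattern in patterns:
--             if model_id.lower().startswith(pattern.lower()):
--                 return (provider, model_id)
--
--     # Default to specified provider (usually ollama)
--     return (default_provider, model_id)
-- ===== SOURCE B (Python) =====
-- _PROVIDERS = frozenset({"ollama", "gemini", "openai", "anthropic", "groq", "huggingface"})
--
-- # Cloud-model prefixes keyed by the prefix string itself.  No prefix in this
-- # table is a prefix of another, so at most one rule can ever match a given id;
-- # that makes the match-order irrelevant and allows a hash lookup per length
-- # instead of a linear startswith scan.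
-- _PREFIX_TO_PROVIDER = {
--     "ada": "openai",
--     "gpt-": "openai",
--     "curie": "openai",
--     "gemini-": "gemini",
--     "davinci": "openai",
--     "babbage": "openai",
--     "claude-": "anthropic",
--     "mixtral": "groq",
--     "llama-3.1": "groq",
--     "llama-3.3": "groq",
-- }
-- _PREFIX_LENS = (3, 4, 5, 7, 9)  # the distinct key lengths
--
--
-- def normalize_model_id(model_id: str, default_provider: str = "ollama") -> tuple[str, str]:
--     if not model_id:
--         return (default_provider, "llama3")
--     mid = model_id.strip()
--     # provider prefix: locate the first colon once instead of scanning providers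
--     i = mid.find(":")
--     if i >= 0 and mid[:i] in _PROVIDERS:
--         return (mid[:i], mid[i + 1:])
--     # cloud patterns: hash-index the id's prefix at each possible key length
--     low = mid.lower()
--     for k in _PREFIX_LENS:
--         prov = _PREFIX_TO_PROVIDER.get(low[:k])
--         if prov is not None:
--             return (prov, mid)
--     return (default_provider, mid)
-- ===== Notes on version B (the rewrite author's own statement) =====
-- stated objective: alternative
-- what changed: B locates the first colon once (find) and tests the head against a provider set instead of A's per-provider startswith scan, and replaces A's nested provider/pattern startswith loops by hash lookups of the lowercased id's prefix at each possible pattern length, keyed by a prefix-to-provider dict (correct because no pattern is a prefix of another, so at most one rule can match).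
import Mathlib
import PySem

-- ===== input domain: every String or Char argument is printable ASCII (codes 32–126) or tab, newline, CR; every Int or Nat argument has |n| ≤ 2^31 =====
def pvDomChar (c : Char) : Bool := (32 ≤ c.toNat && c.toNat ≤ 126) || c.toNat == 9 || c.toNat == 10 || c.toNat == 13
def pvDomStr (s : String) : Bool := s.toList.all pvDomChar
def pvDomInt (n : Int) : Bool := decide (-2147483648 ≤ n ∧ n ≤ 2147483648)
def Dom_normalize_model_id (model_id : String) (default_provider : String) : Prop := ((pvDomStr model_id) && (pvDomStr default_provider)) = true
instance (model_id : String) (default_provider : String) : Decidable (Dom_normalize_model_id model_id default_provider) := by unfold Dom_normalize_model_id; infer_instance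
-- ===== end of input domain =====

-- B finds the first colon once and tests the head against a provider set instead of A's
-- per-provider startswith scan, and replaces A's nested provider/pattern startswith loops
-- by hash lookups of the lowercased id's prefix at each possible pattern length
-- (no pattern is a prefix of another, so at most one rule can match). Objective: alternative.

-- ===== PORT A =====
def aKnown : List String := ["ollama", "gemini", "openai", "anthropic", "groq", "huggingface"]

def aCloud : List (String × List String) :=
  [("gemini", ["gemini-"]),
   ("openai", ["gpt-", "davinci", "curie", "babbage", "ada"]),
   ("anthropic", ["claude-"]),
   ("groq", ["llama-3.3", "llama-3.1", "mixtral"])]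

-- the `for provider in known_providers` loop (returns some r on early return)
def aProvLoop (m : String) : List String → Option (String × String)
  | [] => none
  | p :: ps =>
    if PySem.Str.startswith m (p ++ ":") then
      some (p, PySem.Str.slice m (some (PySem.Str.len p + 1)) none)
    else aProvLoop m ps

-- the inner `for pattern in patterns` loop
def aPatLoop (m provider : String) : List String → Option (String × String)
  | [] => none
  | pat :: ps =>
    if PySem.Str.startswith (PySem.Str.lower m) (PySem.Str.lower pat) then
      some (provider, m)
    else aPatLoop m provider ps

-- the outer `for provider, patterns in cloud_model_patterns.items()` loop
def aCloudLoop (m : String) : List (String × List String) → Option (String × String)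
  | [] => none
  | (prov, pats) :: rest =>
    match aPatLoop m prov pats with
    | some r => some r
    | none => aCloudLoop m rest

-- body after the empty check and strip
def aTail (mid default_provider : String) : String × String :=
  match aProvLoop mid aKnown with
  | some r => r
  | none =>
    match aCloudLoop mid aCloud with
    | some r => r
    | none => (default_provider, mid)

def normalize_model_id (model_id : String) (default_provider : String) : String × String :=
  if model_id = "" then (default_provider, "llama3")
  else aTail (PySem.Str.strip model_id) default_provider

-- ===== PORT B =====
-- _PROVIDERS: a frozenset of the known providers
def bProviders : PySem.Set String := PySem.Set.ofList ["ollama", "gemini", "openai", "anthropic", "groq", "huggingface"]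

-- _PREFIX_TO_PROVIDER: dict keyed by the cloud-model prefix itself
def bPrefixDict : PySem.Dict (List Char) String := PySem.Dict.mk
  [(['a','d','a'], "openai"),
   (['g','p','t','-'], "openai"),
   (['c','u','r','i','e'], "openai"),
   (['g','e','m','i','n','i','-'], "gemini"),
   (['d','a','v','i','n','c','i'], "openai"),
   (['b','a','b','b','a','g','e'], "openai"),
   (['c','l','a','u','d','e','-'], "anthropic"),
   (['m','i','x','t','r','a','l'], "groq"),
   (['l','l','a','m','a','-','3','.','1'], "groq"),
   (['l','l','a','m','a','-','3','.','3'], "groq")]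

def bLens : List Nat := [3, 4, 5, 7, 9]  -- _PREFIX_LENS, the distinct key lengths

-- the `for k in _PREFIX_LENS` loop; low[:k] with k ≥ 0 is `take k` (PySem.List.slice_to_natCast)
def bLenLoop (low : List Char) : List Nat → Option String
  | [] => none
  | k :: ks =>
    match bPrefixDict.get? (low.take k) with
    | some prov => some prov
    | none => bLenLoop low ks

-- the cloud-pattern fallback: lowercase once, look the prefix up at each key length
def bFallback (mid default_provider : String) : String × String :=
  match bLenLoop (PySem.Chars.lower mid.toList) bLens with
  | some prov => (prov, mid)
  | none => (default_provider, mid)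

-- body after the empty check and strip: one colon search plus a set membership test
def bTail (mid default_provider : String) : String × String :=
  let i := PySem.Str.find mid ":"
  if 0 ≤ i ∧ bProviders.contains (PySem.Str.slice mid none (some i)) then
    (PySem.Str.slice mid none (some i), PySem.Str.slice mid (some (i + 1)) none)
  else bFallback mid default_provider

def normalize_model_id_alt (model_id : String) (default_provider : String) : String × String :=
  if model_id = "" then (default_provider, "llama3")
  else bTail (PySem.Str.strip model_id) default_provider

-- ===== PRECONDITION & SPEC =====
def Spec_normalize_model_id (model_id : String) (default_provider : String) (out : String × String) : Prop := out = normalize_model_id_alt model_id default_provider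
instance (model_id : String) (default_provider : String) (out : String × String) : Decidable (Spec_normalize_model_id model_id default_provider out) := by unfold Spec_normalize_model_id; infer_instance

-- ===== CLAIM (what is proved, stated in full; the proofs are below) =====
def Claim_equal_normalize_model_id : Prop := ∀ (model_id : String) (default_provider : String), Dom_normalize_model_id model_id default_provider → Spec_normalize_model_id model_id default_provider (normalize_model_id model_id default_provider)

-- ===== LEMMAS AND PROOFS =====

-- if ':' occurs, dropWhile starts with it
theorem dropWhile_colon (cs : List Char) (h : ':' ∈ cs) :
    cs.dropWhile (· ≠ ':') = ':' :: (cs.dropWhile (· ≠ ':')).tail := by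
  induction cs with
  | nil => cases h
  | cons c rest ih =>
    by_cases hc : c = ':'
    · simp [hc]
    · have : ':' ∈ rest := by cases h with
        | head => exact absurd rfl hc
        | tail _ hm => exact hm
      simpa [hc] using ih this

theorem take_colon (pcs t : List Char) (h : ':' ∉ pcs) :
    (pcs ++ ':' :: t).takeWhile (· ≠ ':') = pcs := by
  induction pcs with
  | nil => simp
  | cons c rest ih =>
    have hc : c ≠ ':' := fun hh => h (hh ▸ List.mem_cons_self)
    simp only [List.cons_append, List.takeWhile_cons]
    rw [if_pos (by simpa using hc), ih (fun hm => h (List.mem_cons_of_mem _ hm))]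

theorem take_len_takeWhile (cs : List Char) :
    cs.take (cs.takeWhile (· ≠ ':')).length = cs.takeWhile (· ≠ ':') := by
  obtain ⟨t, ht⟩ := List.takeWhile_prefix (l := cs) (fun c => decide (c ≠ ':'))
  set w := cs.takeWhile (· ≠ ':') with hw
  rw [← ht]
  exact List.take_left

theorem drop_len_takeWhile (cs : List Char) :
    cs.drop (cs.takeWhile (· ≠ ':')).length = cs.dropWhile (· ≠ ':') := by
  have ht := List.takeWhile_append_dropWhile (p := fun c => decide (c ≠ ':')) (l := cs)
  set w := cs.takeWhile (· ≠ ':') with hw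
  set v := cs.dropWhile (· ≠ ':') with hv
  rw [← ht]
  exact List.drop_left

-- mid.find(":") in closed form: index of the first ':' or -1
theorem find_colon (cs : List Char) :
    PySem.Chars.find cs [':'] =
      if ':' ∈ cs then ((cs.takeWhile (· ≠ ':')).length : Int) else -1 := by
  by_cases hc : ':' ∈ cs
  · rw [if_pos hc]
    have hne : PySem.Chars.find cs [':'] ≠ -1 := by
      rw [Ne, PySem.Chars.find_eq_neg_one_iff]
      simp [List.singleton_infix_iff, hc]
    have hspec := PySem.Chars.findFrom_natCast_spec cs [':'] 0 (Nat.zero_le _)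
      (by simpa [PySem.Chars.findFrom_zero] using hne)
    rw [show ((0 : Nat) : Int) = 0 by norm_num, PySem.Chars.findFrom_zero] at hspec
    obtain ⟨hge, hpre, hmin⟩ := hspec
    set j := (cs.takeWhile (· ≠ ':')).length with hj
    set n := (PySem.Chars.find cs [':']).toNat with hn
    have hjle : j ≤ cs.length := by
      have := (List.takeWhile_sublist (l := cs) (fun c => decide (c ≠ ':'))).length_le; omega
    have hprej : [':'] <+: cs.drop j := by
      rw [hj, drop_len_takeWhile, dropWhile_colon cs hc]
      exact ⟨_, rfl⟩
    have hle : n ≤ j := by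
      by_contra hlt
      exact hmin j (Nat.zero_le _) (by omega) hprej
    have hge2 : ¬ n < j := by
      intro hlt
      obtain ⟨t, ht⟩ := hpre
      have hnlen : n < cs.length := by omega
      have hdropn : cs.drop n = ':' :: t := by simpa using ht.symm
      have hcn : cs[n] = ':' := by
        have h2 : cs[n]? = some ':' := by
          rw [← List.head?_drop, hdropn]; rfl
        simpa [List.getElem?_eq_getElem hnlen] using h2
      have hmem : cs[n] ∈ cs.takeWhile (· ≠ ':') := by
        have h4 : cs[n] ∈ cs.take j := by
          have h5 : (cs.take j)[n]'(by simp; omega) = cs[n] := List.getElem_take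
          exact h5 ▸ List.getElem_mem _
        rw [hj, take_len_takeWhile] at h4
        exact h4
      have := List.mem_takeWhile_imp hmem
      simp [hcn] at this
    have hnj : n = j := by omega
    omega
  · rw [if_neg hc, PySem.Chars.find_eq_neg_one_iff]
    simp [List.singleton_infix_iff, hc]

-- mid.startswith(p + ":") characterised by the first-colon decomposition
theorem sw_str (mid p : String) (hp : ':' ∉ p.toList) :
    PySem.Str.startswith mid (p ++ ":") = true ↔
      (':' ∈ mid.toList ∧ mid.toList.takeWhile (· ≠ ':') = p.toList) := by
  have hsep : (":" : String).toList = [':'] := by decide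
  rw [show PySem.Str.startswith mid (p ++ ":") =
        PySem.Chars.startswith mid.toList (p.toList ++ [':']) by
      simp [PySem.Str.startswith, String.toList_append, hsep]]
  rw [PySem.Chars.startswith_iff]
  constructor
  · rintro ⟨t, hteq⟩
    rw [← hteq]
    constructor
    · simp
    · simpa using take_colon p.toList t hp
  · rintro ⟨hc, ht⟩
    refine ⟨(mid.toList.dropWhile (· ≠ ':')).tail, ?_⟩
    have hsplit := List.takeWhile_append_dropWhile (p := fun c => decide (c ≠ ':')) (l := mid.toList)
    rw [dropWhile_colon mid.toList hc] at hsplit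
    conv_rhs => rw [← hsplit]
    rw [ht]
    simp

-- mid[:j] is the part before the first ':' when mid = t ++ ':' :: r, j = |t|
theorem slice_head (mid : String) (t r : List Char) (h : mid.toList = t ++ ':' :: r) :
    PySem.Str.slice mid none (some (t.length : Int)) = String.ofList t := by
  simp only [PySem.Str.slice, PySem.Chars.slice]
  rw [PySem.List.slice_to _ (by positivity), h]
  congr 1
  rw [Int.toNat_natCast]
  exact List.take_left' rfl

-- mid[j+1:] is the part after the first ':' when mid = t ++ ':' :: r, j = |t|
theorem slice_after (mid : String) (t r : List Char) (h : mid.toList = t ++ ':' :: r) :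
    PySem.Str.slice mid (some ((t.length : Int) + 1)) none = String.ofList r := by
  simp only [PySem.Str.slice, PySem.Chars.slice]
  rw [PySem.List.slice_from _ (by positivity), h]
  congr 1
  rw [show (((t.length : Int)) + 1).toNat = t.length + 1 by omega]
  rw [show t ++ ':' :: r = (t ++ [':']) ++ r by simp]
  exact List.drop_left' (by simp)

-- A's slice mid[len(p)+1:] for a provider p, same decomposition
theorem slice_tail (mid p : String) (r : List Char) (h : mid.toList = p.toList ++ ':' :: r) :
    PySem.Str.slice mid (some (PySem.Str.len p + 1)) none = String.ofList r := by
  have : PySem.Str.len p = (p.toList.length : Int) := by simp [PySem.Str.len_eq]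
  rw [this]
  exact slice_after mid p.toList r h

-- the cloud-pattern fallback: A's nested startswith loops equal B's per-length dict lookups
theorem bl_gemini (rest : List Char) : bLenLoop (['g','e','m','i','n','i','-'] ++ rest) bLens = some "gemini" := by
  simp [bLenLoop, bLens, bPrefixDict, PySem.Dict.get?]

theorem bl_gpt (rest : List Char) : bLenLoop (['g','p','t','-'] ++ rest) bLens = some "openai" := by
  simp [bLenLoop, bLens, bPrefixDict, PySem.Dict.get?]

theorem bl_davinci (rest : List Char) : bLenLoop (['d','a','v','i','n','c','i'] ++ rest) bLens = some "openai" := by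
  simp [bLenLoop, bLens, bPrefixDict, PySem.Dict.get?]

theorem bl_curie (rest : List Char) : bLenLoop (['c','u','r','i','e'] ++ rest) bLens = some "openai" := by
  simp [bLenLoop, bLens, bPrefixDict, PySem.Dict.get?]

theorem bl_babbage (rest : List Char) : bLenLoop (['b','a','b','b','a','g','e'] ++ rest) bLens = some "openai" := by
  simp [bLenLoop, bLens, bPrefixDict, PySem.Dict.get?]

theorem bl_ada (rest : List Char) : bLenLoop (['a','d','a'] ++ rest) bLens = some "openai" := by
  simp [bLenLoop, bLens, bPrefixDict, PySem.Dict.get?]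

theorem bl_claude (rest : List Char) : bLenLoop (['c','l','a','u','d','e','-'] ++ rest) bLens = some "anthropic" := by
  simp [bLenLoop, bLens, bPrefixDict, PySem.Dict.get?]

theorem bl_llama33 (rest : List Char) : bLenLoop (['l','l','a','m','a','-','3','.','3'] ++ rest) bLens = some "groq" := by
  simp [bLenLoop, bLens, bPrefixDict, PySem.Dict.get?]

theorem bl_llama31 (rest : List Char) : bLenLoop (['l','l','a','m','a','-','3','.','1'] ++ rest) bLens = some "groq" := by
  simp [bLenLoop, bLens, bPrefixDict, PySem.Dict.get?]

theorem bl_mixtral (rest : List Char) : bLenLoop (['m','i','x','t','r','a','l'] ++ rest) bLens = some "groq" := by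
  simp [bLenLoop, bLens, bPrefixDict, PySem.Dict.get?]

-- take k lo can only equal a dict key that is a prefix of lo
theorem take_ne (lo P : List Char) (k : Nat) (h : ¬ P <+: lo) : (P = lo.take k) = False :=
  eq_false fun he => h (he ▸ List.take_prefix k lo)

theorem bl_none (lo : List Char) (n1 : ¬ (['g','e','m','i','n','i','-'] <+: lo)) (n2 : ¬ (['g','p','t','-'] <+: lo)) (n3 : ¬ (['d','a','v','i','n','c','i'] <+: lo)) (n4 : ¬ (['c','u','r','i','e'] <+: lo)) (n5 : ¬ (['b','a','b','b','a','g','e'] <+: lo)) (n6 : ¬ (['a','d','a'] <+: lo)) (n7 : ¬ (['c','l','a','u','d','e','-'] <+: lo)) (n8 : ¬ (['l','l','a','m','a','-','3','.','3'] <+: lo)) (n9 : ¬ (['l','l','a','m','a','-','3','.','1'] <+: lo)) (n10 : ¬ (['m','i','x','t','r','a','l'] <+: lo)) :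
    bLenLoop lo bLens = none := by
  simp [bLenLoop, bLens, bPrefixDict, PySem.Dict.get?,
    take_ne lo _ _ n1, take_ne lo _ _ n2, take_ne lo _ _ n3, take_ne lo _ _ n4, take_ne lo _ _ n5,
    take_ne lo _ _ n6, take_ne lo _ _ n7, take_ne lo _ _ n8, take_ne lo _ _ n9, take_ne lo _ _ n10]

theorem cloud_eq (m d : String) :
    (match aCloudLoop m aCloud with
     | some r => r
     | none => (d, m)) = bFallback m d := by
  have e1 : PySem.Chars.lower ['g','e','m','i','n','i','-'] = ['g','e','m','i','n','i','-'] := by decide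
  have e2 : PySem.Chars.lower ['g','p','t','-'] = ['g','p','t','-'] := by decide
  have e3 : PySem.Chars.lower ['d','a','v','i','n','c','i'] = ['d','a','v','i','n','c','i'] := by decide
  have e4 : PySem.Chars.lower ['c','u','r','i','e'] = ['c','u','r','i','e'] := by decide
  have e5 : PySem.Chars.lower ['b','a','b','b','a','g','e'] = ['b','a','b','b','a','g','e'] := by decide
  have e6 : PySem.Chars.lower ['a','d','a'] = ['a','d','a'] := by decide
  have e7 : PySem.Chars.lower ['c','l','a','u','d','e','-'] = ['c','l','a','u','d','e','-'] := by decide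
  have e8 : PySem.Chars.lower ['l','l','a','m','a','-','3','.','3'] = ['l','l','a','m','a','-','3','.','3'] := by decide
  have e9 : PySem.Chars.lower ['l','l','a','m','a','-','3','.','1'] = ['l','l','a','m','a','-','3','.','1'] := by decide
  have e10 : PySem.Chars.lower ['m','i','x','t','r','a','l'] = ['m','i','x','t','r','a','l'] := by decide
  by_cases h1 : PySem.Chars.startswith (PySem.Chars.lower m.toList) ['g','e','m','i','n','i','-'] = true
  · obtain ⟨rest, hrest⟩ := (PySem.Chars.startswith_iff (PySem.Chars.lower m.toList) ['g','e','m','i','n','i','-']).mp h1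
    have hbl : bLenLoop (PySem.Chars.lower m.toList) bLens = some "gemini" := by rw [← hrest]; exact bl_gemini rest
    simp [aCloudLoop, aCloud, aPatLoop, e1, h1, bFallback, hbl]
  by_cases h2 : PySem.Chars.startswith (PySem.Chars.lower m.toList) ['g','p','t','-'] = true
  · obtain ⟨rest, hrest⟩ := (PySem.Chars.startswith_iff (PySem.Chars.lower m.toList) ['g','p','t','-']).mp h2
    have hbl : bLenLoop (PySem.Chars.lower m.toList) bLens = some "openai" := by rw [← hrest]; exact bl_gpt rest
    simp [aCloudLoop, aCloud, aPatLoop, e1, e2, h1, h2, bFallback, hbl]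
  by_cases h3 : PySem.Chars.startswith (PySem.Chars.lower m.toList) ['d','a','v','i','n','c','i'] = true
  · obtain ⟨rest, hrest⟩ := (PySem.Chars.startswith_iff (PySem.Chars.lower m.toList) ['d','a','v','i','n','c','i']).mp h3
    have hbl : bLenLoop (PySem.Chars.lower m.toList) bLens = some "openai" := by rw [← hrest]; exact bl_davinci rest
    simp [aCloudLoop, aCloud, aPatLoop, e1, e2, e3, h1, h2, h3, bFallback, hbl]
  by_cases h4 : PySem.Chars.startswith (PySem.Chars.lower m.toList) ['c','u','r','i','e'] = true
  · obtain ⟨rest, hrest⟩ := (PySem.Chars.startswith_iff (PySem.Chars.lower m.toList) ['c','u','r','i','e']).mp h4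
    have hbl : bLenLoop (PySem.Chars.lower m.toList) bLens = some "openai" := by rw [← hrest]; exact bl_curie rest
    simp [aCloudLoop, aCloud, aPatLoop, e1, e2, e3, e4, h1, h2, h3, h4, bFallback, hbl]
  by_cases h5 : PySem.Chars.startswith (PySem.Chars.lower m.toList) ['b','a','b','b','a','g','e'] = true
  · obtain ⟨rest, hrest⟩ := (PySem.Chars.startswith_iff (PySem.Chars.lower m.toList) ['b','a','b','b','a','g','e']).mp h5
    have hbl : bLenLoop (PySem.Chars.lower m.toList) bLens = some "openai" := by rw [← hrest]; exact bl_babbage rest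
    simp [aCloudLoop, aCloud, aPatLoop, e1, e2, e3, e4, e5, h1, h2, h3, h4, h5, bFallback, hbl]
  by_cases h6 : PySem.Chars.startswith (PySem.Chars.lower m.toList) ['a','d','a'] = true
  · obtain ⟨rest, hrest⟩ := (PySem.Chars.startswith_iff (PySem.Chars.lower m.toList) ['a','d','a']).mp h6
    have hbl : bLenLoop (PySem.Chars.lower m.toList) bLens = some "openai" := by rw [← hrest]; exact bl_ada rest
    simp [aCloudLoop, aCloud, aPatLoop, e1, e2, e3, e4, e5, e6, h1, h2, h3, h4, h5, h6, bFallback, hbl]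
  by_cases h7 : PySem.Chars.startswith (PySem.Chars.lower m.toList) ['c','l','a','u','d','e','-'] = true
  · obtain ⟨rest, hrest⟩ := (PySem.Chars.startswith_iff (PySem.Chars.lower m.toList) ['c','l','a','u','d','e','-']).mp h7
    have hbl : bLenLoop (PySem.Chars.lower m.toList) bLens = some "anthropic" := by rw [← hrest]; exact bl_claude rest
    simp [aCloudLoop, aCloud, aPatLoop, e1, e2, e3, e4, e5, e6, e7, h1, h2, h3, h4, h5, h6, h7, bFallback, hbl]
  by_cases h8 : PySem.Chars.startswith (PySem.Chars.lower m.toList) ['l','l','a','m','a','-','3','.','3'] = true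
  · obtain ⟨rest, hrest⟩ := (PySem.Chars.startswith_iff (PySem.Chars.lower m.toList) ['l','l','a','m','a','-','3','.','3']).mp h8
    have hbl : bLenLoop (PySem.Chars.lower m.toList) bLens = some "groq" := by rw [← hrest]; exact bl_llama33 rest
    simp [aCloudLoop, aCloud, aPatLoop, e1, e2, e3, e4, e5, e6, e7, e8, h1, h2, h3, h4, h5, h6, h7, h8, bFallback, hbl]
  by_cases h9 : PySem.Chars.startswith (PySem.Chars.lower m.toList) ['l','l','a','m','a','-','3','.','1'] = true
  · obtain ⟨rest, hrest⟩ := (PySem.Chars.startswith_iff (PySem.Chars.lower m.toList) ['l','l','a','m','a','-','3','.','1']).mp h9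
    have hbl : bLenLoop (PySem.Chars.lower m.toList) bLens = some "groq" := by rw [← hrest]; exact bl_llama31 rest
    simp [aCloudLoop, aCloud, aPatLoop, e1, e2, e3, e4, e5, e6, e7, e8, e9, h1, h2, h3, h4, h5, h6, h7, h8, h9, bFallback, hbl]
  by_cases h10 : PySem.Chars.startswith (PySem.Chars.lower m.toList) ['m','i','x','t','r','a','l'] = true
  · obtain ⟨rest, hrest⟩ := (PySem.Chars.startswith_iff (PySem.Chars.lower m.toList) ['m','i','x','t','r','a','l']).mp h10
    have hbl : bLenLoop (PySem.Chars.lower m.toList) bLens = some "groq" := by rw [← hrest]; exact bl_mixtral rest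
    simp [aCloudLoop, aCloud, aPatLoop, e1, e2, e3, e4, e5, e6, e7, e8, e9, e10, h1, h2, h3, h4, h5, h6, h7, h8, h9, h10, bFallback, hbl]
  · have hbl : bLenLoop (PySem.Chars.lower m.toList) bLens = none :=
      bl_none (PySem.Chars.lower m.toList)
        (fun hp => h1 ((PySem.Chars.startswith_iff (PySem.Chars.lower m.toList) ['g','e','m','i','n','i','-']).mpr hp))
        (fun hp => h2 ((PySem.Chars.startswith_iff (PySem.Chars.lower m.toList) ['g','p','t','-']).mpr hp))
        (fun hp => h3 ((PySem.Chars.startswith_iff (PySem.Chars.lower m.toList) ['d','a','v','i','n','c','i']).mpr hp))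
        (fun hp => h4 ((PySem.Chars.startswith_iff (PySem.Chars.lower m.toList) ['c','u','r','i','e']).mpr hp))
        (fun hp => h5 ((PySem.Chars.startswith_iff (PySem.Chars.lower m.toList) ['b','a','b','b','a','g','e']).mpr hp))
        (fun hp => h6 ((PySem.Chars.startswith_iff (PySem.Chars.lower m.toList) ['a','d','a']).mpr hp))
        (fun hp => h7 ((PySem.Chars.startswith_iff (PySem.Chars.lower m.toList) ['c','l','a','u','d','e','-']).mpr hp))
        (fun hp => h8 ((PySem.Chars.startswith_iff (PySem.Chars.lower m.toList) ['l','l','a','m','a','-','3','.','3']).mpr hp))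
        (fun hp => h9 ((PySem.Chars.startswith_iff (PySem.Chars.lower m.toList) ['l','l','a','m','a','-','3','.','1']).mpr hp))
        (fun hp => h10 ((PySem.Chars.startswith_iff (PySem.Chars.lower m.toList) ['m','i','x','t','r','a','l']).mpr hp))
    simp [aCloudLoop, aCloud, aPatLoop, e1, e2, e3, e4, e5, e6, e7, e8, e9, e10, h1, h2, h3, h4, h5, h6, h7, h8, h9, h10, bFallback, hbl]

-- the post-strip bodies agree
theorem tail_eq (mid d : String) : aTail mid d = bTail mid d := by
  have s1 := sw_str mid "ollama" (by decide)
  have s2 := sw_str mid "gemini" (by decide)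
  have s3 := sw_str mid "openai" (by decide)
  have s4 := sw_str mid "anthropic" (by decide)
  have s5 := sw_str mid "groq" (by decide)
  have s6 := sw_str mid "huggingface" (by decide)
  have hfind : PySem.Str.find mid ":" = PySem.Chars.find mid.toList [':'] := by
    simp [PySem.Str.find_eq]
  by_cases hc : ':' ∈ mid.toList
  · set t := mid.toList.takeWhile (· ≠ ':') with htdef
    set r := (mid.toList.dropWhile (· ≠ ':')).tail with hrdef
    have hdecomp : mid.toList = t ++ ':' :: r := by
      conv_lhs => rw [← List.takeWhile_append_dropWhile (p := fun c => decide (c ≠ ':'))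
                        (l := mid.toList)]
      rw [dropWhile_colon mid.toList hc]
    have hfi : PySem.Str.find mid ":" = (t.length : Int) := by
      rw [hfind, find_colon, if_pos hc]
    have hhead : PySem.Str.slice mid none (some ((t.length : Int))) = String.ofList t :=
      slice_head mid t r hdecomp
    have hafter : PySem.Str.slice mid (some ((t.length : Int) + 1)) none = String.ofList r :=
      slice_after mid t r hdecomp
    simp only [bTail, hfi, hhead, hafter]
    by_cases h1 : t = "ollama".toList
    · have he : String.ofList t = "ollama" := by rw [h1, String.ofList_toList]
      rw [if_pos (by exact ⟨by positivity, by rw [he]; decide⟩)]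
      simp only [aTail, aProvLoop, aKnown, if_pos (s1.mpr ⟨hc, h1⟩)]
      rw [slice_tail mid "ollama" r (by rw [hdecomp, h1]), he]
    by_cases h2 : t = "gemini".toList
    · have he : String.ofList t = "gemini" := by rw [h2, String.ofList_toList]
      rw [if_pos (by exact ⟨by positivity, by rw [he]; decide⟩)]
      simp only [aTail, aProvLoop, aKnown, if_neg (fun hx => h1 ((s1.mp hx).2)), if_pos (s2.mpr ⟨hc, h2⟩)]
      rw [slice_tail mid "gemini" r (by rw [hdecomp, h2]), he]
    by_cases h3 : t = "openai".toList
    · have he : String.ofList t = "openai" := by rw [h3, String.ofList_toList]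
      rw [if_pos (by exact ⟨by positivity, by rw [he]; decide⟩)]
      simp only [aTail, aProvLoop, aKnown, if_neg (fun hx => h1 ((s1.mp hx).2)), if_neg (fun hx => h2 ((s2.mp hx).2)), if_pos (s3.mpr ⟨hc, h3⟩)]
      rw [slice_tail mid "openai" r (by rw [hdecomp, h3]), he]
    by_cases h4 : t = "anthropic".toList
    · have he : String.ofList t = "anthropic" := by rw [h4, String.ofList_toList]
      rw [if_pos (by exact ⟨by positivity, by rw [he]; decide⟩)]
      simp only [aTail, aProvLoop, aKnown, if_neg (fun hx => h1 ((s1.mp hx).2)), if_neg (fun hx => h2 ((s2.mp hx).2)), if_neg (fun hx => h3 ((s3.mp hx).2)), if_pos (s4.mpr ⟨hc, h4⟩)]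
      rw [slice_tail mid "anthropic" r (by rw [hdecomp, h4]), he]
    by_cases h5 : t = "groq".toList
    · have he : String.ofList t = "groq" := by rw [h5, String.ofList_toList]
      rw [if_pos (by exact ⟨by positivity, by rw [he]; decide⟩)]
      simp only [aTail, aProvLoop, aKnown, if_neg (fun hx => h1 ((s1.mp hx).2)), if_neg (fun hx => h2 ((s2.mp hx).2)), if_neg (fun hx => h3 ((s3.mp hx).2)), if_neg (fun hx => h4 ((s4.mp hx).2)), if_pos (s5.mpr ⟨hc, h5⟩)]
      rw [slice_tail mid "groq" r (by rw [hdecomp, h5]), he]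
    by_cases h6 : t = "huggingface".toList
    · have he : String.ofList t = "huggingface" := by rw [h6, String.ofList_toList]
      rw [if_pos (by exact ⟨by positivity, by rw [he]; decide⟩)]
      simp only [aTail, aProvLoop, aKnown, if_neg (fun hx => h1 ((s1.mp hx).2)), if_neg (fun hx => h2 ((s2.mp hx).2)), if_neg (fun hx => h3 ((s3.mp hx).2)), if_neg (fun hx => h4 ((s4.mp hx).2)), if_neg (fun hx => h5 ((s5.mp hx).2)), if_pos (s6.mpr ⟨hc, h6⟩)]
      rw [slice_tail mid "huggingface" r (by rw [hdecomp, h6]), he]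
    · -- no known provider prefix: both fall through to the cloud patterns
      have hne : ∀ q : String, t ≠ q.toList → ¬ (String.ofList t = q) := by
        intro q hq he
        exact hq (by rw [← String.toList_ofList (l := t), he])
      rw [if_neg (by
        rintro ⟨-, hmem⟩
        rw [show bProviders = ["ollama", "gemini", "openai", "anthropic", "groq", "huggingface"] from by decide] at hmem
        simp [hne _ h1, hne _ h2, hne _ h3, hne _ h4, hne _ h5, hne _ h6] at hmem)]
      simp only [aTail, aProvLoop, aKnown, if_neg (fun hx => h1 ((s1.mp hx).2)), if_neg (fun hx => h2 ((s2.mp hx).2)), if_neg (fun hx => h3 ((s3.mp hx).2)), if_neg (fun hx => h4 ((s4.mp hx).2)), if_neg (fun hx => h5 ((s5.mp hx).2)), if_neg (fun hx => h6 ((s6.mp hx).2))]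
      exact cloud_eq mid d
  · have hfi : PySem.Str.find mid ":" = -1 := by
      rw [hfind, find_colon, if_neg hc]
    simp only [bTail, hfi]
    rw [if_neg (by rintro ⟨hge, -⟩; norm_num at hge)]
    simp only [aTail, aProvLoop, aKnown,
               if_neg (fun hx => hc (s1.mp hx).1), if_neg (fun hx => hc (s2.mp hx).1),
               if_neg (fun hx => hc (s3.mp hx).1), if_neg (fun hx => hc (s4.mp hx).1),
               if_neg (fun hx => hc (s5.mp hx).1), if_neg (fun hx => hc (s6.mp hx).1)]
    exact cloud_eq mid d

-- ===== VERDICT (by name: the statement is the Claim_ definition above) =====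
theorem normalize_model_id_spec : Claim_equal_normalize_model_id := by
  intro model_id default_provider _
  unfold Spec_normalize_model_id normalize_model_id normalize_model_id_alt
  by_cases h0 : model_id = ""
  · simp [h0]
  · rw [if_neg h0, if_neg h0]
    exact tail_eq _ _
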